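-- pv_equiv track=rewrite | github.com/moodykhalif23/facemeup | backend/app/services/training_manifest.py | _resolve_condition
-- ===== SOURCE A (Python) =====
-- CONDITIONS = ["Acne", "Hyperpigmentation", "Uneven tone", "Dehydration", "None detected"]
--
-- def _resolve_condition(conditions: list[str]) -> str:
--     for c in conditions or []:
--         if c in CONDITIONS and c != "None detected":
--             return c
--     for c in conditions or []:
--         if c in CONDITIONS:
--             return c
--     return "None detected"
-- ===== SOURCE B (Python) =====
-- CONDITIONS = ["Acne", "Hyperpigmentation", "Uneven tone", "Dehydration", "None detected"]
--
-- def _resolve_condition(conditions: list[str]) -> str: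
--     # Inverted traversal: instead of scanning the input for the first
--     # catalogued condition, scan the fixed CONDITIONS catalogue, locate each
--     # actionable condition's first position in the input with list.index,
--     # and return the one occurring earliest in the input.
--     lst = conditions or []
--     best_pos = None
--     best = "None detected"
--     for v in CONDITIONS:
--         if v == "None detected":
--             continue
--         try:
--             pos = lst.index(v)
--         except ValueError:
--             continue
--         if best_pos is None or pos < best_pos:
--             best_pos = pos
--             best = v
--     return best
-- ===== Notes on version B (the rewrite author's own statement) =====
-- stated objective: alternative
-- what changed: B inverts the traversal: instead of scanning the input (up to twice) for the first catalogued condition, it iterates over the fixed CONDITIONS catalogue, finds each actionable condition's first position in the input with list.index (a C-level scan), and returns the one occurring earliest; the default covers the sentinel-only cases A's second loop handled.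
import Mathlib
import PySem

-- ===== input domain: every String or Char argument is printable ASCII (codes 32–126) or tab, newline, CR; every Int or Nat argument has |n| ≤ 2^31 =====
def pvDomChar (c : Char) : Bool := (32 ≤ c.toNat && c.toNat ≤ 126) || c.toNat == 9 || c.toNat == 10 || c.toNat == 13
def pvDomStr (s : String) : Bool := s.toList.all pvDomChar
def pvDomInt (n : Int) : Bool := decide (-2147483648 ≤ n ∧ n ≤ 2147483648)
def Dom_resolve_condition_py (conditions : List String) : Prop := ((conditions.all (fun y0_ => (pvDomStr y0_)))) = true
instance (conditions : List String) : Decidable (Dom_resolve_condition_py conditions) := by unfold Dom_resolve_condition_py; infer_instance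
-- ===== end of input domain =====

-- ===== PORT A =====
-- B inverts the traversal: it scans the fixed CONDITIONS catalogue and picks the
-- actionable condition occurring earliest in the input (via list.index); objective: alternative.
def pyCONDITIONS : List String :=
  ["Acne", "Hyperpigmentation", "Uneven tone", "Dehydration", "None detected"]

-- first loop of A: first c with c in CONDITIONS and c != "None detected"
def resolveLoop1 : List String → Option String
  | [] => none
  | c :: rest =>
      if pyCONDITIONS.contains c && c != "None detected" then some c
      else resolveLoop1 rest

-- second loop of A: first c with c in CONDITIONS
def resolveLoop2 : List String → Option String
  | [] => none
  | c :: rest =>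
      if pyCONDITIONS.contains c then some c
      else resolveLoop2 rest

def resolve_condition_py (conditions : List String) : String :=
  match resolveLoop1 conditions with
  | some c => c
  | none =>
      match resolveLoop2 conditions with
      | some c => c
      | none => "None detected"

-- ===== PORT B =====
-- loop body of Source B: state (best_pos, best); skip the sentinel, look up v's first
-- position in the input (list.index → PySem.List.index?, none = ValueError), keep the earliest
def altStep (lst : List String) (acc : Option Nat × String) (v : String) : Option Nat × String :=
  if v == "None detected" then acc
  else
    match PySem.List.index? lst v with
    | none => acc
    | some pos =>
        match acc.1 with
        | none => (some pos, v)
        | some b => if pos < b then (some pos, v) else acc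

def resolve_condition_py_alt (conditions : List String) : String :=
  (pyCONDITIONS.foldl (altStep conditions) (none, "None detected")).2

-- ===== PRECONDITION & SPEC =====
def Spec_resolve_condition_py (conditions : List String) (out : String) : Prop := out = resolve_condition_py_alt conditions
instance (conditions : List String) (out : String) : Decidable (Spec_resolve_condition_py conditions out) := by unfold Spec_resolve_condition_py; infer_instance

-- ===== CLAIM (what is proved, stated in full; the proofs are below) =====
def Claim_equal_resolve_condition_py : Prop := ∀ (conditions : List String), Dom_resolve_condition_py conditions → Spec_resolve_condition_py conditions (resolve_condition_py conditions)

-- ===== LEMMAS AND PROOFS =====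

-- common value of both programs: the first input element that is a valid
-- non-sentinel condition, else "None detected"
def specFirst : List String → String
  | [] => "None detected"
  | c :: rest =>
      if pyCONDITIONS.contains c && c != "None detected" then c
      else specFirst rest

-- A = specFirst ------------------------------------------------------------

theorem resolveLoop2_of_loop1_none (l : List String) (h : resolveLoop1 l = none) :
    (match resolveLoop2 l with | some c => c | none => "None detected") = "None detected" := by
  induction l with
  | nil => simp [resolveLoop2]
  | cons c rest ih =>
      unfold resolveLoop1 at h
      by_cases hc : (pyCONDITIONS.contains c && c != "None detected") = true
      · rw [if_pos hc] at h; exact absurd h (by simp)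
      · rw [if_neg hc] at h
        unfold resolveLoop2
        by_cases hm : pyCONDITIONS.contains c = true
        · rw [if_pos hm]
          have hcd : c = "None detected" := by
            by_cases hnd : c = "None detected"
            · exact hnd
            · exact absurd (by rw [hm, Bool.true_and]; exact bne_iff_ne.mpr hnd) hc
          simp [hcd]
        · rw [if_neg hm]; exact ih h

theorem a_eq_spec (l : List String) : resolve_condition_py l = specFirst l := by
  induction l with
  | nil => rfl
  | cons c rest ih =>
      by_cases hc : (pyCONDITIONS.contains c && c != "None detected") = true
      · have h1 : resolveLoop1 (c :: rest) = some c := by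
          unfold resolveLoop1; exact if_pos hc
        simp only [resolve_condition_py, specFirst, h1]
        rw [if_pos hc]
      · have h1 : resolveLoop1 (c :: rest) = resolveLoop1 rest := by
          rw [show resolveLoop1 (c :: rest) =
            if (pyCONDITIONS.contains c && c != "None detected") = true then some c
            else resolveLoop1 rest from rfl, if_neg hc]
        simp only [resolve_condition_py, specFirst, h1]
        rw [if_neg hc, ← ih]
        cases hr : resolveLoop1 rest with
        | some d => simp [resolve_condition_py, hr]
        | none =>
            simp only [resolve_condition_py, hr]
            rw [show resolveLoop2 (c :: rest) =
              if pyCONDITIONS.contains c = true then some c else resolveLoop2 rest from rfl]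
            by_cases hm : pyCONDITIONS.contains c = true
            · rw [if_pos hm]
              have hcd : c = "None detected" := by
                by_cases hnd : c = "None detected"
                · exact hnd
                · exact absurd (by rw [hm, Bool.true_and]; exact bne_iff_ne.mpr hnd) hc
              rw [hcd]
              simpa using (resolveLoop2_of_loop1_none rest hr).symm
            · rw [if_neg hm]

-- B = specFirst ------------------------------------------------------------

-- shifting all stored positions by one (what consing a non-candidate head does)
def shiftSt : Option Nat × String → Option Nat × String
  | (none, s) => (none, s)
  | (some i, s) => (some (i + 1), s)

theorem shiftSt_snd (acc : Option Nat × String) : (shiftSt acc).2 = acc.2 := by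
  rcases acc with ⟨o, s⟩; cases o <;> rfl

theorem altStep_shift (rest : List String) (c v : String)
    (h : v = "None detected" ∨ c ≠ v) (acc : Option Nat × String) :
    altStep (c :: rest) (shiftSt acc) v = shiftSt (altStep rest acc v) := by
  by_cases hs : v = "None detected"
  · simp [altStep, hs]
  · have hcv : c ≠ v := h.resolve_left hs
    have hbne : (v == "None detected") = false := by
      simp [hs]
    have hidx : PySem.List.index? (c :: rest) v = (PySem.List.index? rest v).map (· + 1) :=
      PySem.List.index?_cons_of_ne rest hcv
    simp only [altStep, hbne, Bool.false_eq_true, if_false, hidx]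
    cases hr : PySem.List.index? rest v with
    | none => simp
    | some i =>
        rcases acc with ⟨o, s⟩
        cases o with
        | none => simp [shiftSt]
        | some b =>
            simp only [Option.map_some, shiftSt]
            by_cases hib : i < b
            · rw [if_pos (by omega), if_pos hib]
            · rw [if_neg (by omega), if_neg hib]

theorem foldl_shift (rest : List String) (c : String) (vs : List String)
    (h : ∀ v ∈ vs, v = "None detected" ∨ c ≠ v) (acc : Option Nat × String) :
    List.foldl (altStep (c :: rest)) (shiftSt acc) vs
      = shiftSt (List.foldl (altStep rest) acc vs) := by
  induction vs generalizing acc with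
  | nil => rfl
  | cons v vs ih =>
      simp only [List.foldl_cons]
      rw [altStep_shift rest c v (h v (by simp)) acc]
      exact ih (fun w hw => h w (by simp [hw])) _

theorem altStep_zero (lst : List String) (s v : String) :
    altStep lst (some 0, s) v = (some 0, s) := by
  unfold altStep
  split
  · rfl
  · cases PySem.List.index? lst v <;> simp

theorem foldl_zero (lst : List String) (s : String) (vs : List String) :
    List.foldl (altStep lst) (some 0, s) vs = (some 0, s) := by
  induction vs with
  | nil => rfl
  | cons v vs ih => simp only [List.foldl_cons, altStep_zero]; exact ih

theorem altStep_self (rest : List String) (c : String) (hs : c ≠ "None detected")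
    (acc : Option Nat × String) :
    altStep (c :: rest) (shiftSt acc) c = (some 0, c) := by
  have hbne : (c == "None detected") = false := by simp [hs]
  have hidx : PySem.List.index? (c :: rest) c = some 0 := PySem.List.index?_cons_self c rest
  rcases acc with ⟨o, s⟩
  cases o with
  | none =>
      simp only [altStep, hbne, Bool.false_eq_true, if_false, hidx, shiftSt]
  | some b =>
      simp only [altStep, hbne, Bool.false_eq_true, if_false, hidx, shiftSt]
      simp

-- a valid non-sentinel head wins: split the catalogue around c
theorem alt_cons_valid_split (c : String) (rest l1 l2 : List String)
    (hspl : pyCONDITIONS = l1 ++ c :: l2)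
    (h1 : ∀ v ∈ l1, v = "None detected" ∨ c ≠ v)
    (hs : c ≠ "None detected") :
    resolve_condition_py_alt (c :: rest) = c := by
  unfold resolve_condition_py_alt
  rw [hspl, List.foldl_append]
  have hsh : List.foldl (altStep (c :: rest)) (none, "None detected") l1
      = shiftSt (List.foldl (altStep rest) (none, "None detected") l1) := by
    have := foldl_shift rest c l1 h1 (none, "None detected")
    simpa [shiftSt] using this
  rw [hsh, List.foldl_cons, altStep_self rest c hs, foldl_zero]

theorem alt_cons_invalid (c : String) (rest : List String)
    (h : ¬ (pyCONDITIONS.contains c && c != "None detected") = true) :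
    resolve_condition_py_alt (c :: rest) = resolve_condition_py_alt rest := by
  have hall : ∀ v ∈ pyCONDITIONS, v = "None detected" ∨ c ≠ v := by
    intro v hv
    by_cases hcs : c = "None detected"
    · by_cases hvs : v = "None detected"
      · exact Or.inl hvs
      · exact Or.inr (by rw [hcs]; exact fun he => hvs he.symm)
    · have hnc : pyCONDITIONS.contains c ≠ true := by
        intro hct
        exact h (by rw [hct, Bool.true_and]; exact bne_iff_ne.mpr hcs)
      exact Or.inr (by rintro rfl; exact hnc (List.contains_iff_mem.mpr hv))
  unfold resolve_condition_py_alt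
  have := foldl_shift rest c pyCONDITIONS hall (none, "None detected")
  rw [show (shiftSt (none, "None detected")) = ((none : Option Nat), "None detected") from rfl] at this
  rw [this, shiftSt_snd]

theorem b_eq_spec (l : List String) : resolve_condition_py_alt l = specFirst l := by
  induction l with
  | nil => rfl
  | cons c rest ih =>
      by_cases hc : (pyCONDITIONS.contains c && c != "None detected") = true
      · have hs : c ≠ "None detected" := by
          intro he
          rw [he] at hc
          simp at hc
        have hmem : c ∈ pyCONDITIONS := List.contains_iff_mem.mp (by
          exact (Bool.and_eq_true_iff.mp hc).1)
        have hval : resolve_condition_py_alt (c :: rest) = c := by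
          have hm : c = "Acne" ∨ c = "Hyperpigmentation" ∨ c = "Uneven tone" ∨
              c = "Dehydration" ∨ c = "None detected" := by
            simpa [pyCONDITIONS] using hmem
          rcases hm with rfl | rfl | rfl | rfl | rfl
          · exact alt_cons_valid_split _ rest [] _ rfl (by intro v hv; simp at hv) hs
          · exact alt_cons_valid_split _ rest ["Acne"] _ rfl (by decide) hs
          · exact alt_cons_valid_split _ rest ["Acne", "Hyperpigmentation"] _ rfl (by decide) hs
          · exact alt_cons_valid_split _ rest ["Acne", "Hyperpigmentation", "Uneven tone"] _ rfl
              (by decide) hs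
          · exact absurd rfl hs
        rw [hval]
        unfold specFirst
        rw [if_pos hc]
      · rw [alt_cons_invalid c rest hc]
        unfold specFirst
        rw [if_neg hc]
        exact ih

-- ===== VERDICT (by name: the statement is the Claim_ definition above) =====
theorem resolve_condition_py_spec : Claim_equal_resolve_condition_py := by
  intro conditions _
  unfold Spec_resolve_condition_py
  rw [a_eq_spec, b_eq_spec]
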